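-- pv_equiv track=rewrite | github.com/chertila1/test_task | loader.py | prepare_row
-- ===== SOURCE A (Python) =====
-- def prepare_row(row: tuple, slovar: dict):
--     prepared_row: list = []
--
--     indent = 0
--     prev_col_name = ""
--     for index, column in enumerate(list(slovar.keys())):
--         prev_col_name = column
--         prepared_row.append(row[indent])
--         indent += slovar.get(column)
--     return prepared_row
-- ===== SOURCE B (Python) =====
-- def prepare_row(row: tuple, slovar: dict):
--     # Offset-free formulation: no running accumulator at all; the i-th selected
--     # element sits at index sum(vals[:i]), recomputed independently per position.
--     vals = list(slovar.values())
--     return [row[sum(vals[:i])] for i in range(len(vals))]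
-- ===== Notes on version B (the rewrite author's own statement) =====
-- stated objective: alternative
-- what changed: A carries a running indent accumulator through one loop over the dict keys, appending row[indent] and looking each value up by key; B keeps no accumulator or mutable state: it computes each output position independently as row[sum(vals[:i])], re-summing the value prefix slice for every i, trading O(n) for O(n^2).
import Mathlib
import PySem

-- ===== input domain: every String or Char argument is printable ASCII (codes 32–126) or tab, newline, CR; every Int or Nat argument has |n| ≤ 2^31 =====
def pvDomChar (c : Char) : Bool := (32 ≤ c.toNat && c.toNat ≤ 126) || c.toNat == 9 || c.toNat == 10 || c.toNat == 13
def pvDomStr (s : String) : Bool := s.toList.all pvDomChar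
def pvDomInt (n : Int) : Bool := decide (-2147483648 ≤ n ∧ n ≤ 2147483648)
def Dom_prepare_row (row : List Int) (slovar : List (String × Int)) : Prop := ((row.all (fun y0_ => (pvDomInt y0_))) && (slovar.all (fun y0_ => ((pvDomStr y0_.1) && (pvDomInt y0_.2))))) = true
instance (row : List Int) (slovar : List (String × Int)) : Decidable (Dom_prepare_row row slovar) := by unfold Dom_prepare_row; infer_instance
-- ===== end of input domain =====

-- B replaces A's running-accumulator loop by a stateless per-position formulation:
-- each output is row[sum(vals[:i])], the prefix slice re-summed independently for every i (O(n^2), no accumulator).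


-- ===== PORT A =====
-- Literal port: loop over enumerate(list(slovar.keys())) carrying (prepared_row, indent, prev_col_name);
-- the loop index is unused, prev_col_name is dead state kept for fidelity; row[indent] is pyGetD under
-- Pre_'s InRange condition; slovar.get(column) always hits since column ∈ keys, ported as getD.
def prepare_row (row : List Int) (slovar : List (String × Int)) : List Int :=
  let d := PySem.Dict.ofList slovar
  ((PySem.List.enumerate d.keys 0).foldl
      (fun (st : List Int × Int × String) ic =>
        (st.1 ++ [PySem.List.pyGetD row st.2.1 0], st.2.1 + d.getD ic.2 0, ic.2))
      ([], 0, "")).1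

-- ===== PORT B =====
-- row[sum(vals[:i])] is pyGetD of the sum of the slice vals[:i] (exact under Pre_'s InRange).
def prepare_row_alt (row : List Int) (slovar : List (String × Int)) : List Int :=
  let vals := (PySem.Dict.ofList slovar).values
  (PySem.List.pyRange 0 vals.length 1).map
    (fun i => PySem.List.pyGetD row (PySem.List.slice vals none (some i)).sum 0)

-- ===== PRECONDITION & SPEC =====
-- Pre_ excludes exactly the inputs where Python A raises IndexError: some cumulative offset
-- (prefix sum of the dict's values) is outside row's Python index range.
def Pre_prepare_row (row : List Int) (slovar : List (String × Int)) : Prop :=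
  ∀ i : Nat, i < (PySem.Dict.ofList slovar).values.length →
    PySem.Raise.InRange row.length (((PySem.Dict.ofList slovar).values.take i).sum)
instance (row : List Int) (slovar : List (String × Int)) : Decidable (Pre_prepare_row row slovar) := by unfold Pre_prepare_row; infer_instance
def pvWitness_prepare_row : List Int × (List (String × Int)) := ([5, 7, 9], [("a", 2), ("b", -1)])

def Spec_prepare_row (row : List Int) (slovar : List (String × Int)) (out : List Int) : Prop := out = prepare_row_alt row slovar
instance (row : List Int) (slovar : List (String × Int)) (out : List Int) : Decidable (Spec_prepare_row row slovar out) := by unfold Spec_prepare_row; infer_instance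

-- ===== CLAIM (what is proved, stated in full; the proofs are below) =====
def Claim_equal_prepare_row : Prop := ∀ (row : List Int) (slovar : List (String × Int)), Dom_prepare_row row slovar → Pre_prepare_row row slovar → Spec_prepare_row row slovar (prepare_row row slovar)

-- ===== LEMMAS AND PROOFS =====

-- prefix sums of vs starting at t (proof-only characterisation of A's loop)
def pvPrefixes (t : Int) : List Int → List Int
  | [] => []
  | v :: vs => t :: pvPrefixes (t + v) vs

theorem pv_foldA (row : List Int) (g : String → Int) (ks : List String) :
    ∀ (i0 : Int) (a : List Int) (t : Int) (s : String),
    ((PySem.List.enumerate ks i0).foldl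
        (fun (st : List Int × Int × String) ic =>
          (st.1 ++ [PySem.List.pyGetD row st.2.1 0], st.2.1 + g ic.2, ic.2))
        (a, t, s)).1
      = a ++ (pvPrefixes t (ks.map g)).map (fun o => PySem.List.pyGetD row o 0) := by
  induction ks with
  | nil => intro i0 a t s; simp [PySem.List.enumerate_nil, pvPrefixes]
  | cons k ks ih =>
      intro i0 a t s
      simp [PySem.List.enumerate_cons, List.foldl_cons, ih, pvPrefixes]

-- pvPrefixes as independent prefix-slice sums
theorem pv_prefixes_eq (vs : List Int) : ∀ t : Int,
    pvPrefixes t vs = (List.range vs.length).map (fun i => t + (vs.take i).sum) := by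
  induction vs with
  | nil => intro t; simp [pvPrefixes]
  | cons v vs ih =>
      intro t
      simp [pvPrefixes, List.range_succ_eq_map, ih, List.map_map, Function.comp, add_assoc]

-- ===== VERDICT (by name: the statement is the Claim_ definition above) =====
theorem prepare_row_spec : Claim_equal_prepare_row := by
  intro row slovar _ _
  unfold Spec_prepare_row prepare_row prepare_row_alt
  have hnd : (PySem.Dict.ofList slovar).keys.Nodup := PySem.Dict.nodup_keys_ofList slovar
  have hv : (PySem.Dict.ofList slovar).values
      = (PySem.Dict.ofList slovar).keys.map (fun k => (PySem.Dict.ofList slovar).getD k 0) :=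
    PySem.Dict.values_eq_map_keys _ hnd 0
  rw [pv_foldA row (fun k => (PySem.Dict.ofList slovar).getD k 0), ← hv, pv_prefixes_eq]
  simp [PySem.List.pyRange_one, List.map_map, Function.comp, PySem.List.slice_to_natCast]
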